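-- pv_equiv track=rewrite | github.com/derek-ht/communications-platform | project-backend/src/admin.py | is_only_global_owner
-- ===== SOURCE A (Python) =====
-- def is_only_global_owner(users, user_id):
--     count = 0
--     user_is_owner = False
--     for user in users:
--         if user['permission_id'] == 1:
--             if user['user_id'] == user_id:
--                 user_is_owner = True
--             count += 1
--     if count == 1 and user_is_owner:
--         return True
-- ===== SOURCE B (Python) =====
-- def is_only_global_owner(users, user_id):
--     it = iter(users)
--     for user in it:
--         if user['permission_id'] == 1:
--             # found the first global owner; it must be user_id,
--             # and no further owner may exist in the remaining users
--             if user['user_id'] != user_id: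
--                 return
--             if all(u['permission_id'] != 1 for u in it):
--                 return True
--             return
-- ===== Notes on version B (the rewrite author's own statement) =====
-- stated objective: alternative
-- what changed: Instead of a full pass maintaining a counter and flag, B searches for the FIRST owner, returns immediately if its id differs, and otherwise short-circuit-verifies that no second owner exists in the remaining users (early exit, no counting).
import Mathlib
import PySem

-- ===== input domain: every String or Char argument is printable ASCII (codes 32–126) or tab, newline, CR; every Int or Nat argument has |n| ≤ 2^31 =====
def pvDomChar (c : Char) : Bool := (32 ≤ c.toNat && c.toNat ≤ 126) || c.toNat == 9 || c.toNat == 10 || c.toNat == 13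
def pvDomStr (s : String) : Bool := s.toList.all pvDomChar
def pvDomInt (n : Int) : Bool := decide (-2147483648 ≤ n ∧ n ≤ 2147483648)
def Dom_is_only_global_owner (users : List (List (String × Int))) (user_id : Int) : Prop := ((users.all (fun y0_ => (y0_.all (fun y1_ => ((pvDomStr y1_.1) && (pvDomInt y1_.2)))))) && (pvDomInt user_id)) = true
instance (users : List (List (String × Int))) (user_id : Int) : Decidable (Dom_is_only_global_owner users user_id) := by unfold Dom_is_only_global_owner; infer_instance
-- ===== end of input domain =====

-- B replaces A's full-pass counter-and-flag loop by an early-exit search: find the FIRST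
-- owner, return if its id differs, else short-circuit-check no further owner exists.

-- ===== PORT A =====
-- loop over users with state (count, user_is_owner); a missing dict key is a KeyError → none
def isOnlyGoA (uid : Int) : List (List (String × Int)) → Int → Bool → Option Bool
  | [], count, user_is_owner =>
      if count == 1 && user_is_owner then some true else none
  | user :: rest, count, user_is_owner =>
      match (PySem.Dict.mk user).get? "permission_id" with
      | none => none
      | some p =>
        if p == 1 then
          match (PySem.Dict.mk user).get? "user_id" with
          | none => none
          | some i =>
              isOnlyGoA uid rest (count + 1) (if i == uid then true else user_is_owner)
        else isOnlyGoA uid rest count user_is_owner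

def is_only_global_owner (users : List (List (String × Int))) (user_id : Int) : Option Bool :=
  isOnlyGoA user_id users 0 false

-- ===== PORT B =====
-- all(u['permission_id'] != 1 for u in it): short-circuits at the first owner found
def isOnlyNoMore : List (List (String × Int)) → Option Bool
  | [] => some true
  | u :: rest =>
      match (PySem.Dict.mk u).get? "permission_id" with
      | none => none
      | some p => if p == 1 then some false else isOnlyNoMore rest

-- the main loop of Source B: search the first owner, then decide immediately
def isOnlyFind (uid : Int) : List (List (String × Int)) → Option Bool
  | [] => none
  | u :: rest =>
      match (PySem.Dict.mk u).get? "permission_id" with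
      | none => none
      | some p =>
        if p == 1 then
          match (PySem.Dict.mk u).get? "user_id" with
          | none => none
          | some i =>
              if i == uid then
                match isOnlyNoMore rest with
                | none => none
                | some b => if b then some true else none
              else none
        else isOnlyFind uid rest

def is_only_global_owner_alt (users : List (List (String × Int))) (user_id : Int) : Option Bool :=
  isOnlyFind user_id users

-- ===== PRECONDITION & SPEC =====
-- Pre_ excludes exactly the inputs on which A raises KeyError: a user dict without a
-- 'permission_id' key, or an owner (permission_id == 1) without a 'user_id' key.
def Pre_is_only_global_owner (users : List (List (String × Int))) (user_id : Int) : Prop :=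
  ∀ u ∈ users, ((PySem.Dict.mk u).get? "permission_id").isSome ∧
    ((PySem.Dict.mk u).get? "permission_id" = some 1 → ((PySem.Dict.mk u).get? "user_id").isSome)
instance (users : List (List (String × Int))) (user_id : Int) : Decidable (Pre_is_only_global_owner users user_id) := by unfold Pre_is_only_global_owner; infer_instance

def pvWitness_is_only_global_owner : (List (List (String × Int))) × Int :=
  ([[("permission_id", 1), ("user_id", 7)], [("permission_id", 2), ("user_id", 3)]], 7)

def Spec_is_only_global_owner (users : List (List (String × Int))) (user_id : Int) (out : Option Bool) : Prop := out = is_only_global_owner_alt users user_id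
instance (users : List (List (String × Int))) (user_id : Int) (out : Option Bool) : Decidable (Spec_is_only_global_owner users user_id out) := by unfold Spec_is_only_global_owner; infer_instance

-- ===== CLAIM (what is proved, stated in full; the proofs are below) =====
def Claim_equal_is_only_global_owner : Prop := ∀ (users : List (List (String × Int))) (user_id : Int), Dom_is_only_global_owner users user_id → Pre_is_only_global_owner users user_id → Spec_is_only_global_owner users user_id (is_only_global_owner users user_id)

-- ===== LEMMAS AND PROOFS =====

-- proof-only abstraction: the list of owner ids (none on KeyError)
def pvOwnerIds : List (List (String × Int)) → Option (List Int)
  | [] => some []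
  | u :: rest =>
      match (PySem.Dict.mk u).get? "permission_id" with
      | none => none
      | some p =>
        if p == 1 then
          match (PySem.Dict.mk u).get? "user_id" with
          | none => none
          | some i => (pvOwnerIds rest).map (i :: ·)
        else pvOwnerIds rest

-- loop invariant for A: the loop, started at (count, owner), is determined by the owner ids
theorem isOnlyGoA_eq (uid : Int) (users : List (List (String × Int)))
    (h : Pre_is_only_global_owner users uid) :
    ∀ (count : Int) (owner : Bool),
      isOnlyGoA uid users count owner =
        match pvOwnerIds users with
        | none => none
        | some os =>
            if (count + os.length == 1) && (owner || os.contains uid) then some true else none := by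
  induction users with
  | nil =>
      intro count owner
      simp [isOnlyGoA, pvOwnerIds]
  | cons u rest ih =>
      intro count owner
      obtain ⟨⟨hp, hu⟩, hrest⟩ : _ ∧ Pre_is_only_global_owner rest uid := by
        constructor
        · exact h u (List.mem_cons_self ..)
        · intro v hv; exact h v (List.mem_cons_of_mem _ hv)
      obtain ⟨p, hpget⟩ := Option.isSome_iff_exists.mp hp
      by_cases hp1 : p = 1
      · subst hp1
        obtain ⟨i, higet⟩ := Option.isSome_iff_exists.mp (hu hpget)
        rw [isOnlyGoA, pvOwnerIds, hpget, higet]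
        simp only [show ((1 : Int) == 1) = true from by decide, if_true]
        cases hos : pvOwnerIds rest with
        | none => simp [ih hrest, hos]
        | some os =>
            rw [ih hrest (count + 1) (if i == uid then true else owner), hos]
            simp only [Option.map_some]
            have harr : count + 1 + (os.length : Int) = count + ((i :: os).length : Int) := by
              simp [List.length_cons]; push_cast; omega
            rw [harr]
            have hb : ((if i == uid then true else owner) || os.contains uid)
                = (owner || (i :: os).contains uid) := by
              by_cases hiu : i = uid
              · subst hiu; cases owner <;> simp [List.contains_cons]
              · have h1 : (i == uid) = false := by simp [hiu]
                cases owner <;> simp [List.contains_cons, h1, Ne.symm hiu]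
            rw [hb]
      · rw [isOnlyGoA, pvOwnerIds, hpget]
        have hpb : (p == (1 : Int)) = false := by simp [hp1]
        simp only [hpb, if_neg Bool.false_ne_true]
        exact ih hrest count owner

-- under Pre_, the owner-id list exists and the no-more-owners check is its emptiness
theorem pvOwnerIds_noMore (uid : Int) (users : List (List (String × Int)))
    (h : Pre_is_only_global_owner users uid) :
    ∃ os, pvOwnerIds users = some os ∧ isOnlyNoMore users = some os.isEmpty := by
  induction users with
  | nil => exact ⟨[], rfl, rfl⟩
  | cons u rest ih =>
      obtain ⟨⟨hp, hu⟩, hrest⟩ : _ ∧ Pre_is_only_global_owner rest uid := by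
        constructor
        · exact h u (List.mem_cons_self ..)
        · intro v hv; exact h v (List.mem_cons_of_mem _ hv)
      obtain ⟨p, hpget⟩ := Option.isSome_iff_exists.mp hp
      obtain ⟨os, hos, hnm⟩ := ih hrest
      by_cases hp1 : p = 1
      · subst hp1
        obtain ⟨i, higet⟩ := Option.isSome_iff_exists.mp (hu hpget)
        refine ⟨i :: os, ?_, ?_⟩
        · rw [pvOwnerIds, hpget, higet]; simp [hos]
        · rw [isOnlyNoMore, hpget]; simp
      · have hpb : (p == (1 : Int)) = false := by simp [hp1]
        refine ⟨os, ?_, ?_⟩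
        · rw [pvOwnerIds, hpget]; simp [hpb, hos]
        · rw [isOnlyNoMore, hpget]; simp [hpb, hnm]

-- B's early-exit search is also determined by the owner ids
theorem isOnlyFind_eq (uid : Int) (users : List (List (String × Int)))
    (h : Pre_is_only_global_owner users uid) :
    isOnlyFind uid users =
      match pvOwnerIds users with
      | none => none
      | some os => if os == [uid] then some true else none := by
  induction users with
  | nil => simp [isOnlyFind, pvOwnerIds]
  | cons u rest ih =>
      obtain ⟨⟨hp, hu⟩, hrest⟩ : _ ∧ Pre_is_only_global_owner rest uid := by
        constructor
        · exact h u (List.mem_cons_self ..)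
        · intro v hv; exact h v (List.mem_cons_of_mem _ hv)
      obtain ⟨p, hpget⟩ := Option.isSome_iff_exists.mp hp
      by_cases hp1 : p = 1
      · subst hp1
        obtain ⟨i, higet⟩ := Option.isSome_iff_exists.mp (hu hpget)
        obtain ⟨os, hos, hnm⟩ := pvOwnerIds_noMore uid rest hrest
        rw [isOnlyFind, pvOwnerIds, hpget, higet]
        simp only [show ((1 : Int) == 1) = true from by decide, if_true, hos, hnm,
          Option.map_some]
        by_cases hiu : i = uid
        · subst hiu
          simp only [beq_self_eq_true, if_true]
          cases os with
          | nil => simp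
          | cons y t => simp
        · have h1 : (i == uid) = false := by simp [hiu]
          simp [h1]
      · have hpb : (p == (1 : Int)) = false := by simp [hp1]
        rw [isOnlyFind, pvOwnerIds, hpget]
        simp only [hpb, if_neg Bool.false_ne_true]
        exact ih hrest

-- ===== VERDICT =====
theorem is_only_global_owner_spec : Claim_equal_is_only_global_owner := by
  intro users uid _ hpre
  unfold Spec_is_only_global_owner is_only_global_owner is_only_global_owner_alt
  rw [isOnlyGoA_eq uid users hpre 0 false, isOnlyFind_eq uid users hpre]
  cases hos : pvOwnerIds users with
  | none => rfl
  | some os =>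
    simp only
    congr 1
    cases os with
    | nil => simp
    | cons x t =>
        cases t with
        | nil =>
            by_cases hx : x = uid
            · simp [hx]
            · simp [List.contains_cons, hx, Ne.symm hx]
        | cons y t' =>
            simp [List.contains_cons]
            intro h0
            exfalso; omega
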